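-- pv_equiv track=rewrite | github.com/Basit-Balogun10/isqed-2026-dv-challenge | submissions/task-2.1/submission-2.1/analysis_scripts/summarize_coverage.py | largest_ranges
-- ===== SOURCE A (Python) =====
-- def largest_ranges(lines: list[int], limit: int = 8) -> list[str]:
--     """Return the largest contiguous uncovered ranges first."""
--     if not lines:
--         return []
--     lines = sorted(set(lines))
--     ranges = []
--     start = prev = lines[0]
--     for line in lines[1:]:
--         if line == prev + 1:
--             prev = line
--             continue
--         ranges.append((start, prev))
--         start = prev = line
--     ranges.append((start, prev))
--
--     ranges.sort(key=lambda r: (r[1] - r[0] + 1, -r[0]), reverse=True)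
--
--     formatted = []
--     for start, end in ranges[:limit]:
--         formatted.append(f"{start}-{end}" if start != end else f"{start}")
--     return formatted
-- ===== SOURCE B (Python) =====
-- def largest_ranges(lines: list[int], limit: int = 8) -> list[str]:
--     """Return the largest contiguous uncovered ranges first."""
--     s = set(lines)
--     starts = sorted(x for x in s if x - 1 not in s)
--     ends = sorted(x for x in s if x + 1 not in s)
--     ranges = list(zip(starts, ends))
--     ranges.sort(key=lambda r: (r[1] - r[0] + 1, -r[0]), reverse=True)
--     return [f"{a}-{b}" if a != b else f"{a}" for a, b in ranges[:limit]]
-- ===== Notes on version B (the rewrite author's own statement) =====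
-- stated objective: alternative
-- what changed: B finds range boundaries by set membership (a value starts a run iff value-1 is not in the set, ends one iff value+1 is not) and zips the sorted starts with the sorted ends, instead of A's sequential start/prev grouping scan over the sorted values.
import Mathlib
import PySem

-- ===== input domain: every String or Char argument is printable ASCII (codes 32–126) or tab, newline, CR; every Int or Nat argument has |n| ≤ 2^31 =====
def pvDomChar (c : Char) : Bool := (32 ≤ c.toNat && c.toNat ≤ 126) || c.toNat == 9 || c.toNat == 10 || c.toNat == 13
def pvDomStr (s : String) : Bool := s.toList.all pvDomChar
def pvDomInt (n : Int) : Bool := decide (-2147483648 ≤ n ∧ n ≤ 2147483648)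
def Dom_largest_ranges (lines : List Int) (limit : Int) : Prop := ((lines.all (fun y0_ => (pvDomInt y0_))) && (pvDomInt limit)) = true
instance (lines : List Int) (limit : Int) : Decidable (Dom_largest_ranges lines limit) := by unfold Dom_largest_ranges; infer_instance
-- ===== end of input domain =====

-- B replaces A's sequential start/prev grouping scan by set-membership boundary
-- detection (x starts a run iff x-1 is not in the set, ends one iff x+1 is not),
-- zipping the sorted starts with the sorted ends: a different algorithm, same cost.

-- ===== PORT A =====
def largest_ranges (lines : List Int) (limit : Int) : List String :=
  if lines = [] then []
  else
    match PySem.List.sorted (PySem.Set.ofList lines) (fun x => x) false with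
    | [] => []   -- unreachable: sorted(set(lines)) of nonempty lines is nonempty
    | h :: t =>
      let st := t.foldl (fun (st : List (Int × Int) × Int × Int) line =>
        if line = st.2.2 + 1 then (st.1, st.2.1, line)
        else (st.1 ++ [(st.2.1, st.2.2)], line, line)) ([], h, h)
      let ranges := st.1 ++ [(st.2.1, st.2.2)]
      let ranges := PySem.List.sorted2 ranges (fun r => r.2 - r.1 + 1) (fun r => -r.1) (reverse := true)
      (PySem.List.slice ranges none (some limit)).foldl
        (fun acc r =>
          acc ++ [if r.1 ≠ r.2 then PySem.Int.toStr r.1 ++ "-" ++ PySem.Int.toStr r.2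
                  else PySem.Int.toStr r.1]) []

-- ===== PORT B =====
def largest_ranges_alt (lines : List Int) (limit : Int) : List String :=
  let s := PySem.Set.ofList lines
  let starts := PySem.List.sorted (s.filter (fun x => !(PySem.Set.contains s (x - 1)))) (fun x => x) false
  let ends := PySem.List.sorted (s.filter (fun x => !(PySem.Set.contains s (x + 1)))) (fun x => x) false
  let ranges := starts.zip ends
  let ranges := PySem.List.sorted2 ranges (fun r => r.2 - r.1 + 1) (fun r => -r.1) (reverse := true)
  (PySem.List.slice ranges none (some limit)).map
    (fun r => if r.1 ≠ r.2 then PySem.Int.toStr r.1 ++ "-" ++ PySem.Int.toStr r.2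
              else PySem.Int.toStr r.1)

-- ===== PRECONDITION & SPEC =====
def Spec_largest_ranges (lines : List Int) (limit : Int) (out : List String) : Prop := out = largest_ranges_alt lines limit
instance (lines : List Int) (limit : Int) (out : List String) : Decidable (Spec_largest_ranges lines limit out) := by unfold Spec_largest_ranges; infer_instance

-- ===== CLAIM (what is proved, stated in full; the proofs are below) =====
def Claim_equal_largest_ranges : Prop := ∀ (lines : List Int) (limit : Int), Dom_largest_ranges lines limit → Spec_largest_ranges lines limit (largest_ranges lines limit)

-- ===== LEMMAS AND PROOFS =====

-- canonical decomposition of a list into maximal consecutive runs (right recursion)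
def pvMerge (x : Int) : List (Int × Int) → List (Int × Int)
  | [] => [(x, x)]
  | (a, b) :: r => if a = x + 1 then (x, b) :: r else (x, x) :: (a, b) :: r

def pvRuns : List Int → List (Int × Int)
  | [] => []
  | x :: xs => pvMerge x (pvRuns xs)

def pvRepl (s : Int) : List (Int × Int) → List (Int × Int)
  | (_, b) :: r => (s, b) :: r
  | [] => []

lemma pvRuns_head (x : Int) (xs : List Int) : ∃ b r, pvRuns (x :: xs) = (x, b) :: r := by
  cases h : pvRuns xs with
  | nil => exact ⟨x, [], by simp [pvRuns, pvMerge, h]⟩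
  | cons p r =>
    obtain ⟨a, b⟩ := p
    by_cases hc : a = x + 1
    · exact ⟨b, r, by simp [pvRuns, pvMerge, h, hc]⟩
    · exact ⟨x, (a, b) :: r, by simp [pvRuns, pvMerge, h, hc]⟩

-- A's fold with state (acc, start, prev) computes pvRuns with the first start replaced
lemma pv_foldA (t : List Int) : ∀ (acc : List (Int × Int)) (s p : Int),
    (let st := t.foldl (fun (st : List (Int × Int) × Int × Int) line =>
        if line = st.2.2 + 1 then (st.1, st.2.1, line)
        else (st.1 ++ [(st.2.1, st.2.2)], line, line)) (acc, s, p)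
     st.1 ++ [(st.2.1, st.2.2)])
    = acc ++ pvRepl s (pvRuns (p :: t)) := by
  induction t with
  | nil => intro acc s p; simp [pvRuns, pvMerge, pvRepl]
  | cons y t ih =>
    intro acc s p
    simp only [List.foldl_cons]
    obtain ⟨b, r, hyr⟩ := pvRuns_head y t
    by_cases hc : y = p + 1
    · rw [if_pos hc]
      have h1 := ih acc s y
      simp only at h1 ⊢
      rw [h1, hyr]
      have h2 : pvRuns (p :: y :: t) = (p, b) :: r := by
        rw [show pvRuns (p :: y :: t) = pvMerge p (pvRuns (y :: t)) from rfl, hyr]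
        simp [pvMerge, hc]
      rw [h2]; rfl
    · rw [if_neg hc]
      have h1 := ih (acc ++ [(s, p)]) y y
      simp only at h1 ⊢
      rw [h1, hyr]
      have h2 : pvRuns (p :: y :: t) = (p, p) :: (y, b) :: r := by
        rw [show pvRuns (p :: y :: t) = pvMerge p (pvRuns (y :: t)) from rfl, hyr]
        simp [pvMerge, hc]
      rw [h2]
      simp [pvRepl]

-- B's zip of the boundary elements equals pvRuns on a strictly increasing list
lemma pv_zip_runs (L : List Int) (hL : L.Pairwise (· < ·)) :
    (L.filter (fun y => !decide ((y - 1) ∈ L))).zip (L.filter (fun y => !decide ((y + 1) ∈ L))) = pvRuns L := by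
  induction L with
  | nil => rfl
  | cons x xs ih =>
    have hall : ∀ y ∈ xs, x < y := fun y hy => (List.pairwise_cons.mp hL).1 y hy
    have hxs : xs.Pairwise (· < ·) := (List.pairwise_cons.mp hL).2
    have hstart : (x :: xs).filter (fun y => !decide ((y - 1) ∈ x :: xs))
        = x :: xs.filter (fun y => !decide ((y - 1) ∈ x :: xs)) := by
      rw [List.filter_cons]
      have h0 : (x - 1) ∉ x :: xs := by
        intro h
        rcases List.mem_cons.mp h with h | h
        · omega
        · exact absurd (hall _ h) (by omega)
      rw [if_pos (by simp [h0])]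
    by_cases he : (x + 1) ∈ xs
    · -- xs starts with x+1: it merges with x
      obtain ⟨y, t, rfl⟩ : ∃ y t, xs = y :: t := by
        cases xs with
        | nil => simp at he
        | cons y t => exact ⟨y, t, rfl⟩
      have hyx : y = x + 1 := by
        rcases List.mem_cons.mp he with h | h
        · omega
        · have h1 := hall y (List.mem_cons_self)
          have h2 := (List.pairwise_cons.mp hxs).1 _ h
          omega
      subst hyx
      have ht : ∀ z ∈ t, x + 1 < z := fun z hz => (List.pairwise_cons.mp hxs).1 z hz
      -- ends of (x :: xs) = ends of xs
      have hend : (x :: (x+1) :: t).filter (fun y => !decide ((y + 1) ∈ x :: (x+1) :: t))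
          = ((x+1) :: t).filter (fun y => !decide ((y + 1) ∈ (x+1) :: t)) := by
        rw [List.filter_cons]
        rw [if_neg (by simp)]
        apply List.filter_congr
        intro z hz
        have hzx : x < z := hall z hz
        have hmem : ((z + 1) ∈ x :: (x+1) :: t) ↔ ((z + 1) ∈ (x+1) :: t) := by
          constructor
          · intro h
            rcases List.mem_cons.mp h with h | h
            · omega
            · exact h
          · exact fun h => List.mem_cons_of_mem _ h
        simp [hmem]
      -- starts of (x :: xs): head of xs is dropped, the rest is as in xs
      have hstart2 : ((x+1) :: t).filter (fun y => !decide ((y - 1) ∈ x :: (x+1) :: t))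
          = t.filter (fun y => !decide ((y - 1) ∈ (x+1) :: t)) := by
        rw [List.filter_cons]
        rw [if_neg (by simp [show (x : Int) + 1 - 1 = x from by ring])]
        apply List.filter_congr
        intro z hz
        have hzx : x + 1 < z := ht z hz
        have hmem : ((z - 1) ∈ x :: (x+1) :: t) ↔ ((z - 1) ∈ (x+1) :: t) := by
          constructor
          · intro h
            rcases List.mem_cons.mp h with h | h
            · omega
            · exact h
          · exact fun h => List.mem_cons_of_mem _ h
        simp [hmem]
      have hstart3 : ((x+1) :: t).filter (fun y => !decide ((y - 1) ∈ (x+1) :: t))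
          = (x+1) :: t.filter (fun y => !decide ((y - 1) ∈ (x+1) :: t)) := by
        rw [List.filter_cons]
        have h0 : x ∉ (x+1) :: t := by
          intro h
          rcases List.mem_cons.mp h with h | h
          · omega
          · exact absurd (ht _ h) (by omega)
        rw [if_pos (by simp [show (x : Int) + 1 - 1 = x from by ring, h0])]
      obtain ⟨b, r, hr⟩ := pvRuns_head (x+1) t
      have hIH := ih hxs
      rw [hstart3, hr] at hIH
      cases hce : ((x+1) :: t).filter (fun y => !decide ((y + 1) ∈ (x+1) :: t)) with
      | nil => rw [hce] at hIH; simp at hIH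
      | cons e es =>
        rw [hce] at hIH
        simp only [List.zip_cons_cons, List.cons.injEq, Prod.mk.injEq] at hIH
        obtain ⟨⟨_, hbe⟩, hres⟩ := hIH
        rw [hstart, hstart2, hend, hce]
        simp only [List.zip_cons_cons]
        have hrx : pvRuns (x :: (x+1) :: t) = (x, b) :: r := by
          rw [show pvRuns (x :: (x+1) :: t) = pvMerge x (pvRuns ((x+1) :: t)) from rfl, hr]
          simp [pvMerge]
        rw [hrx, hres, hbe]
    · -- x is a singleton boundary on both sides relative to xs
      have hend : (x :: xs).filter (fun y => !decide ((y + 1) ∈ x :: xs))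
          = x :: xs.filter (fun y => !decide ((y + 1) ∈ x :: xs)) := by
        rw [List.filter_cons]
        have h0 : (x + 1) ∉ x :: xs := by
          intro h
          rcases List.mem_cons.mp h with h | h
          · omega
          · exact he h
        rw [if_pos (by simp [h0])]
      have hnomem : ∀ z ∈ xs, z ≠ x + 1 := by
        intro z hz h; exact he (h ▸ hz)
      have hcong1 : xs.filter (fun y => !decide ((y - 1) ∈ x :: xs))
          = xs.filter (fun y => !decide ((y - 1) ∈ xs)) := by
        apply List.filter_congr
        intro z hz
        have hmem : ((z - 1) ∈ x :: xs) ↔ ((z - 1) ∈ xs) := by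
          constructor
          · intro h
            rcases List.mem_cons.mp h with h | h
            · exact absurd (by omega : z = x + 1) (hnomem z hz)
            · exact h
          · exact fun h => List.mem_cons_of_mem _ h
        simp [hmem]
      have hcong2 : xs.filter (fun y => !decide ((y + 1) ∈ x :: xs))
          = xs.filter (fun y => !decide ((y + 1) ∈ xs)) := by
        apply List.filter_congr
        intro z hz
        have hzx : x < z := hall z hz
        have hmem : ((z + 1) ∈ x :: xs) ↔ ((z + 1) ∈ xs) := by
          constructor
          · intro h
            rcases List.mem_cons.mp h with h | h
            · omega
            · exact h
          · exact fun h => List.mem_cons_of_mem _ h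
        simp [hmem]
      rw [hstart, hend, hcong1, hcong2]
      simp only [List.zip_cons_cons]
      rw [ih hxs]
      cases xs with
      | nil => simp [pvRuns, pvMerge]
      | cons y t =>
        obtain ⟨b, r, hr⟩ := pvRuns_head y t
        have hy : y ≠ x + 1 := hnomem y List.mem_cons_self
        rw [show pvRuns (x :: y :: t) = pvMerge x (pvRuns (y :: t)) from rfl, hr]
        simp [pvMerge, hy]

lemma pv_foldl_append_map {α β : Type} (f : α → β) (l : List α) :
    ∀ acc : List β, l.foldl (fun a x => a ++ [f x]) acc = acc ++ l.map f := by
  induction l with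
  | nil => intro acc; simp
  | cons x l ih => intro acc; simp [ih]

-- ===== VERDICT (by name: the statement is the Claim_ definition above) =====
theorem largest_ranges_spec : Claim_equal_largest_ranges := by
  intro lines limit _
  unfold Spec_largest_ranges largest_ranges largest_ranges_alt
  by_cases hl : lines = []
  · subst hl
    simp [PySem.Set.ofList, PySem.List.sorted, PySem.List.sorted2, PySem.List.slice]
  · rw [if_neg hl]
    set s := PySem.Set.ofList lines with hs
    have hperm : (PySem.List.sorted s (fun x => x) false).Perm s := PySem.List.sorted_perm _ _ _
    have hLpair : (PySem.List.sorted s (fun x => x) false).Pairwise (· < ·) :=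
      PySem.List.sorted_ofList_pairwise_lt lines
    set L := PySem.List.sorted s (fun x => x) false with hLdef
    have hfil : ∀ (c : Int), PySem.List.sorted (s.filter (fun x => !(PySem.Set.contains s (x + c)))) (fun x => x) false
        = L.filter (fun y => !decide ((y + c) ∈ L)) := by
      intro c
      have hfe : s.filter (fun x => !(PySem.Set.contains s (x + c))) = s.filter (fun y => !decide ((y + c) ∈ L)) := by
        apply List.filter_congr
        intro z _
        have hmem : ((z + c) ∈ s) ↔ ((z + c) ∈ L) := (hperm.mem_iff).symm
        simp [PySem.Set.contains_eq_listContains, List.contains_eq_mem, hmem]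
      rw [hfe]
      apply PySem.List.sorted_eq_of_perm_of_pairwise_lt
      · exact hperm.filter _
      · exact hLpair.filter _
    have hne : L ≠ [] := by
      intro hnil
      have h2 : s = [] := (PySem.List.sorted_eq_nil_iff _ _ _).mp hnil
      rcases List.exists_mem_of_ne_nil lines hl with ⟨x, hx⟩
      have hxs : x ∈ s := (PySem.Set.mem_ofList lines x).mpr hx
      simp [h2] at hxs
    have hB1 : PySem.List.sorted (s.filter (fun x => !(PySem.Set.contains s (x - 1)))) (fun x => x) false
        = L.filter (fun y => !decide ((y - 1) ∈ L)) := by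
      have h1 := hfil (-1)
      have h2 : ∀ (y : Int), y + (-1) = y - 1 := fun y => by ring
      simpa [h2] using h1
    have hB2 := hfil 1
    have hBr : (PySem.List.sorted (s.filter (fun x => !(PySem.Set.contains s (x - 1)))) (fun x => x) false).zip
          (PySem.List.sorted (s.filter (fun x => !(PySem.Set.contains s (x + 1)))) (fun x => x) false)
        = pvRuns L := by
      rw [hB1, hB2, pv_zip_runs L hLpair]
    cases hLc : L with
    | nil => exact absurd hLc hne
    | cons h t =>
      dsimp only
      have hA := pv_foldA t [] h h
      simp only [List.nil_append] at hA
      obtain ⟨b, r, hhr⟩ := pvRuns_head h t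
      have hArng : (let st := t.foldl (fun (st : List (Int × Int) × Int × Int) line =>
          if line = st.2.2 + 1 then (st.1, st.2.1, line)
          else (st.1 ++ [(st.2.1, st.2.2)], line, line)) ([], h, h)
        st.1 ++ [(st.2.1, st.2.2)]) = pvRuns (h :: t) := by
        rw [hA, hhr]; rfl
      rw [hLc] at hBr
      simp only at hArng
      rw [hArng, hBr, pv_foldl_append_map]
      simp
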